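-- pv_equiv track=rewrite | github.com/qqdzv/shoes-project | src/apps/catalog/management/commands/import_data.py | _parse_order_items
-- ===== SOURCE A (Python) =====
-- def _parse_order_items(items_str: str) -> list[tuple[str, int]]:
--     if not items_str:
--         return []
--     parts = [p.strip() for p in str(items_str).split(",")]
--     result = []
--     i = 0
--     while i < len(parts) - 1:
--         article = parts[i]
--         try:
--             qty = int(parts[i + 1])
--             result.append((article, qty))
--             i += 2
--         except (ValueError, IndexError):
--             i += 1
--     return result
-- ===== SOURCE B (Python) =====
-- def _parse_order_items(items_str: str) -> list[tuple[str, int]]: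
--     if not items_str:
--         return []
--     result = []
--     article = None
--     for p in (t.strip() for t in str(items_str).split(",")):
--         if article is None:
--             article = p
--         else:
--             try:
--                 result.append((article, int(p)))
--                 article = None
--             except ValueError:
--                 article = p
--     return result
-- ===== Notes on version B (the rewrite author's own statement) =====
-- stated objective: idiomatic
-- what changed: Replaces A's index-arithmetic while-loop (i, parts[i], parts[i+1], i+=1/2) with a single one-token-per-step state machine over the split parts holding one pending article, dropping the unreachable IndexError handling.
import Mathlib
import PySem

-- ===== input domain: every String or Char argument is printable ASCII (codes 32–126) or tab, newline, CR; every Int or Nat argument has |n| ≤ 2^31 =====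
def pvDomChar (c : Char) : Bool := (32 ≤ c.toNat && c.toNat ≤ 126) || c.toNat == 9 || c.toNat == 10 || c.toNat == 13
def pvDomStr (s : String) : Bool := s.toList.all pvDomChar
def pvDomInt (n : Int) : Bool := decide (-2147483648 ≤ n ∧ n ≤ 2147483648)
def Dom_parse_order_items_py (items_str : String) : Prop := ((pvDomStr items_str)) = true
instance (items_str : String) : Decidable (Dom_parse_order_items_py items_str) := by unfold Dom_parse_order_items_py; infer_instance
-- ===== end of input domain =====

-- B replaces A's index-juggling while loop with a one-token-per-step state machine (one pending article); same O(n) cost, plainer decomposition.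

-- ===== PORT A =====
-- A's while-loop: index i walks the parts, reading parts[i] and parts[i+1]; i+1 < parts.length
-- always holds under the loop guard, so getD never falls back (matches A's unreachable IndexError arm).
def pvALoop (parts : List String) (i : Nat) (result : List (String × Int)) : List (String × Int) :=
  if i < parts.length - 1 then
    let article := parts.getD i ""
    match PySem.Int.ofStr? (parts.getD (i + 1) "") with
    | some q => pvALoop parts (i + 2) (result ++ [(article, q)])
    | none   => pvALoop parts (i + 1) result
  else result
termination_by parts.length - i

def parse_order_items_py (items_str : String) : List (String × Int) :=
  if items_str = "" then []
  else pvALoop (((PySem.Str.split? items_str ",").getD []).map PySem.Str.strip) 0 []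

-- ===== PORT B =====
-- B's state machine: the state is (result so far, pending article or none).
def pvBStep (st : List (String × Int) × Option String) (p : String) :
    List (String × Int) × Option String :=
  match st.2 with
  | none => (st.1, some p)
  | some a =>
    match PySem.Int.ofStr? p with
    | some q => (st.1 ++ [(a, q)], none)
    | none   => (st.1, some p)

def parse_order_items_py_alt (items_str : String) : List (String × Int) :=
  if items_str = "" then []
  else ((((PySem.Str.split? items_str ",").getD []).map PySem.Str.strip).foldl pvBStep ([], none)).1

-- ===== PRECONDITION & SPEC =====
def Spec_parse_order_items_py (items_str : String) (out : List (String × Int)) : Prop := out = parse_order_items_py_alt items_str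
instance (items_str : String) (out : List (String × Int)) : Decidable (Spec_parse_order_items_py items_str out) := by unfold Spec_parse_order_items_py; infer_instance

-- ===== CLAIM (what is proved, stated in full; the proofs are below) =====
def Claim_equal_parse_order_items_py : Prop := ∀ (items_str : String), Dom_parse_order_items_py items_str → Spec_parse_order_items_py items_str (parse_order_items_py items_str)

-- ===== LEMMAS AND PROOFS =====

-- a non-numeric token overwrites the pending article, exactly as it would start one afresh
lemma pvBStep_none_pending (res : List (String × Int)) (a p : String)
    (h : PySem.Int.ofStr? p = none) : pvBStep (res, some a) p = pvBStep (res, none) p := by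
  simp [pvBStep, h]

-- the core invariant: A's loop from index i equals B's fold over the remaining tokens with no pending article
lemma pvALoop_eq_fold (parts : List String) (i : Nat) (res : List (String × Int)) :
    pvALoop parts i res = (List.foldl pvBStep (res, none) (parts.drop i)).1 := by
  fun_induction pvALoop parts i res with
  | case1 i res h article q hq ih =>
    have h1 : i < parts.length := by omega
    have h2 : i + 1 < parts.length := by omega
    rw [ih, List.drop_eq_getElem_cons h1, List.drop_eq_getElem_cons h2]
    simp only [List.foldl_cons]
    have e1 : pvBStep (res, none) parts[i] = (res, some parts[i]) := rfl
    have e2 : pvBStep (res, some parts[i]) parts[i + 1] = (res ++ [(parts[i], q)], none) := by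
      simp [pvBStep, List.getD_eq_getElem parts "" h2 ▸ hq]
    rw [e1, e2]
    simp [article, List.getElem?_eq_getElem h1, Nat.add_assoc]
  | case2 i res h hq ih =>
    have h1 : i < parts.length := by omega
    have h2 : i + 1 < parts.length := by omega
    rw [ih, List.drop_eq_getElem_cons h1, List.drop_eq_getElem_cons h2]
    simp only [List.foldl_cons]
    have hn : PySem.Int.ofStr? parts[i + 1] = none :=
      List.getD_eq_getElem parts "" h2 ▸ hq
    have e1 : pvBStep (res, none) parts[i] = (res, some parts[i]) := rfl
    rw [e1, pvBStep_none_pending res parts[i] parts[i + 1] hn]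
  | case3 i res h =>
    have hlen : (parts.drop i).length ≤ 1 := by
      simp [List.length_drop]; omega
    match hd : parts.drop i with
    | [] => simp
    | [x] => simp [pvBStep]
    | x :: y :: t => rw [hd] at hlen; simp at hlen

-- ===== VERDICT (by name: the statement is the Claim_ definition above) =====
theorem parse_order_items_py_spec : Claim_equal_parse_order_items_py := by
  intro s _
  unfold Spec_parse_order_items_py parse_order_items_py parse_order_items_py_alt
  split
  · rfl
  · rw [pvALoop_eq_fold]; simp
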